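-- pv_equiv track=rewrite | github.com/evanameyer1/Practice | python/fundamentals/python 5 - arrays.py | pair_zeros
-- ===== SOURCE A (Python) =====
-- def pair_zeros(arr):
--     output = []
--     zero_count = 0
--     for num in arr:
--         if num == 0 and zero_count == 0:
--             output.append(num)
--             zero_count = 1
--         elif num == 0:
--             zero_count = 0
--         else:
--             output.append(num)
--     return output
-- ===== SOURCE B (Python) =====
-- def pair_zeros(arr):
--     arr = list(arr)
--     zeros = [i for i, n in enumerate(arr) if n == 0]
--     drop = {i for k, i in enumerate(zeros) if k % 2 == 1}
--     return [n for i, n in enumerate(arr) if i not in drop]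
-- ===== Notes on version B (the rewrite author's own statement) =====
-- stated objective: alternative
-- what changed: Replaces A's single stateful pass with a parity toggle by three passes: collect zero indices via enumerate, build a drop-set of every second zero index, then filter the array by index membership.
import Mathlib
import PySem

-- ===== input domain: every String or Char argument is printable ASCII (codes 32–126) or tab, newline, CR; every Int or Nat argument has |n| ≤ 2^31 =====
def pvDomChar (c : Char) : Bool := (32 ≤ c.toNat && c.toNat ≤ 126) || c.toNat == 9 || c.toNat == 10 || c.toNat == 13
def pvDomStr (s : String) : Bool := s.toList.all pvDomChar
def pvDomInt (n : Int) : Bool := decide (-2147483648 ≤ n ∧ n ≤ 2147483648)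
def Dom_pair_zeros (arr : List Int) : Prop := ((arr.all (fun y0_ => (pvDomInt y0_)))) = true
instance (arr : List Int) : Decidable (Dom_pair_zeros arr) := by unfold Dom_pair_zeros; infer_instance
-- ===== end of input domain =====

-- B does the same job with three passes (zero-index table, drop-set of every second zero, index filter)
-- instead of A's one stateful pass; same cost, different decomposition.

-- ===== PORT A =====
def pair_zeros (arr : List Int) : List Int :=
  (arr.foldl (fun (st : List Int × Int) num =>
      if num == 0 && st.2 == 0 then (st.1 ++ [num], 1)
      else if num == 0 then (st.1, 0)
      else (st.1 ++ [num], st.2)) ([], 0)).1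

-- ===== PORT B =====
def pair_zeros_alt (arr : List Int) : List Int :=
  let zeros : List Int := ((PySem.List.enumerate arr).filter (fun p => p.2 == 0)).map (fun p => p.1)
  let drop : PySem.Set Int :=
    PySem.Set.ofList (((PySem.List.enumerate zeros).filter (fun p => PySem.Int.mod p.1 2 == 1)).map (fun p => p.2))
  ((PySem.List.enumerate arr).filter (fun p => !(PySem.Set.contains drop p.1))).map (fun p => p.2)

-- ===== PRECONDITION & SPEC =====
def Spec_pair_zeros (arr : List Int) (out : List Int) : Prop := out = pair_zeros_alt arr
instance (arr : List Int) (out : List Int) : Decidable (Spec_pair_zeros arr out) := by unfold Spec_pair_zeros; infer_instance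

-- ===== CLAIM (what is proved, stated in full; the proofs are below) =====
def Claim_equal_pair_zeros : Prop := ∀ (arr : List Int), Dom_pair_zeros arr → Spec_pair_zeros arr (pair_zeros arr)

-- ===== LEMMAS AND PROOFS =====

-- reference spec: z = true means the last zero is still unpaired
def pzSpec : List Int → Bool → List Int
  | [], _ => []
  | n :: t, z =>
      if n = 0 then (if z then pzSpec t false else n :: pzSpec t true)
      else n :: pzSpec t z

-- select elements at odd positions (b = false: position 0 is skipped)
def pzSel : Bool → List Int → List Int
  | _, [] => []
  | b, x :: xs => if b then x :: pzSel false xs else pzSel true xs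

theorem pzSel_false_cons (x : Int) (xs : List Int) : pzSel false (x :: xs) = pzSel true xs := rfl
theorem pzSel_true_cons (x : Int) (xs : List Int) : pzSel true (x :: xs) = x :: pzSel false xs := rfl

def pzZerosFrom (s : Int) (t : List Int) : List Int :=
  ((PySem.List.enumerate t s).filter (fun p => p.2 == 0)).map (fun p => p.1)

theorem pzZerosFrom_nil (s : Int) : pzZerosFrom s [] = [] := rfl

theorem pzZerosFrom_cons (s : Int) (n : Int) (t : List Int) :
    pzZerosFrom s (n :: t) = if n = 0 then s :: pzZerosFrom (s + 1) t else pzZerosFrom (s + 1) t := by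
  simp only [pzZerosFrom, PySem.List.enumerate_cons, List.filter_cons]
  by_cases h : n = 0 <;> simp [h]

theorem mem_pzZerosFrom_le {s i : Int} {t : List Int} (h : i ∈ pzZerosFrom s t) : s ≤ i := by
  induction t generalizing s with
  | nil => simp [pzZerosFrom_nil] at h
  | cons n t ih =>
      rw [pzZerosFrom_cons] at h
      split at h
      · rcases List.mem_cons.1 h with h1 | h1
        · omega
        · have := ih h1; omega
      · have := ih h; omega

theorem mem_pzSel {b : Bool} {zs : List Int} {i : Int} (h : i ∈ pzSel b zs) : i ∈ zs := by
  induction zs generalizing b with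
  | nil => simp [pzSel] at h
  | cons x xs ih =>
      cases b with
      | false => exact List.mem_cons_of_mem _ (ih h)
      | true =>
          simp only [pzSel] at h
          rcases List.mem_cons.1 h with h1 | h1
          · simp [h1]
          · exact List.mem_cons_of_mem _ (ih h1)

-- the odd-position selection computed by B's drop comprehension equals pzSel
theorem oddpos_emod_eq_pzSel (zs : List Int) (k : Int) (hk : 0 ≤ k) :
    ((PySem.List.enumerate zs k).filter (fun p => p.1 % 2 == 1)).map (fun p => p.2)
      = pzSel (k % 2 == 1) zs := by
  induction zs generalizing k with
  | nil => rfl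
  | cons x xs ih =>
      rw [PySem.List.enumerate_cons]
      by_cases h : k % 2 = 1
      · have hk1 : ((k + 1) % 2 == 1) = false := by simp; omega
        simp [h, pzSel, hk1 ▸ ih (k + 1) (by omega)]
      · have h0 : k % 2 = 0 := by omega
        have hk1 : ((k + 1) % 2 == 1) = true := by simp; omega
        simp [h0, pzSel, hk1 ▸ ih (k + 1) (by omega)]

-- main B characterization: filtering by the drop set realizes pzSpec
theorem pzFilter_eq_pzSpec (t : List Int) (s : Int) (ph : Bool) :
    (((PySem.List.enumerate t s).filter
        (fun p => !decide (p.1 ∈ pzSel ph (pzZerosFrom s t)))).map (fun p => p.2))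
      = pzSpec t ph := by
  induction t generalizing s ph with
  | nil => rfl
  | cons n t ih =>
      rw [PySem.List.enumerate_cons, pzZerosFrom_cons]
      have hidx : ∀ p ∈ PySem.List.enumerate t (s + 1), s + 1 ≤ p.1 := by
        intro p hp
        rcases (PySem.List.mem_enumerate_iff _ _ _).1 hp with ⟨k, hk, rfl⟩
        omega
      by_cases hn : n = 0
      · subst hn
        simp only [if_pos trivial]
        cases ph with
        | false =>
            -- first zero of a pair: kept; phase flips to true
            rw [pzSel_false_cons]
            have hs : s ∉ pzSel true (pzZerosFrom (s + 1) t) := fun hc =>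
              absurd (mem_pzZerosFrom_le (mem_pzSel hc)) (by omega)
            simp only [List.filter_cons, hs, decide_false, Bool.not_false]
            simp [pzSpec, ih (s + 1) true]
        | true =>
            -- second zero of a pair: dropped; phase flips to false
            rw [pzSel_true_cons]
            have hcongr :
                (PySem.List.enumerate t (s + 1)).filter
                  (fun p => !decide (p.1 = s ∨ p.1 ∈ pzSel false (pzZerosFrom (s + 1) t)))
                = (PySem.List.enumerate t (s + 1)).filter
                  (fun p => !decide (p.1 ∈ pzSel false (pzZerosFrom (s + 1) t))) := by
              apply List.filter_congr
              intro p hp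
              have := hidx p hp
              have hne : p.1 ≠ s := by omega
              simp [hne]
            simp only [List.filter_cons, List.mem_cons]
            rw [if_neg (by simp)]
            rw [hcongr]
            simp [pzSpec, ih (s + 1) false]
      · simp only [if_neg hn]
        have hs : s ∉ pzSel ph (pzZerosFrom (s + 1) t) := fun hc =>
          absurd (mem_pzZerosFrom_le (mem_pzSel hc)) (by omega)
        simp only [List.filter_cons, hs, decide_false, Bool.not_false]
        simp [pzSpec, hn, ih (s + 1) ph]

-- A's fold produces pzSpec
theorem pzFold_eq_pzSpec (t : List Int) (out : List Int) (z : Bool) :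
    (t.foldl (fun (st : List Int × Int) num =>
      if num == 0 && st.2 == 0 then (st.1 ++ [num], 1)
      else if num == 0 then (st.1, 0)
      else (st.1 ++ [num], st.2)) (out, if z then 1 else 0)).1 = out ++ pzSpec t z := by
  induction t generalizing out z with
  | nil => simp [pzSpec]
  | cons n t ih =>
      by_cases hn : n = 0
      · subst hn
        cases z with
        | false =>
            simp only [List.foldl_cons, beq_self_eq_true, Bool.true_and]
            have h := ih (out ++ [0]) true
            rw [List.append_assoc] at h
            simpa [pzSpec] using h
        | true =>
            simp only [List.foldl_cons, beq_self_eq_true, Bool.true_and]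
            simpa [pzSpec] using ih out false
      · simp only [List.foldl_cons]
        have hb : (n == 0) = false := by simp [hn]
        cases z with
        | false =>
            have h := ih (out ++ [n]) false
            rw [List.append_assoc] at h
            simpa [pzSpec, hb, hn] using h
        | true =>
            have h := ih (out ++ [n]) true
            rw [List.append_assoc] at h
            simpa [pzSpec, hb, hn] using h

theorem pair_zeros_eq_spec (arr : List Int) : pair_zeros arr = pzSpec arr false := by
  have := pzFold_eq_pzSpec arr [] false
  simpa [pair_zeros] using this

theorem pair_zeros_alt_eq_spec (arr : List Int) : pair_zeros_alt arr = pzSpec arr false := by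
  unfold pair_zeros_alt
  have hz : (((PySem.List.enumerate arr).filter (fun p => p.2 == 0)).map (fun p => p.1))
      = pzZerosFrom 0 arr := rfl
  have hpred : (fun (p : Int × Int) => PySem.Int.mod p.1 2 == 1)
      = (fun (p : Int × Int) => p.1 % 2 == 1) := by
    funext p; rw [PySem.Int.mod_eq_emod_of_pos (by omega : (0:Int) < 2)]
  have hodd : ((PySem.List.enumerate (pzZerosFrom 0 arr) 0).filter
        (fun p => PySem.Int.mod p.1 2 == 1)).map (fun p => p.2)
      = pzSel false (pzZerosFrom 0 arr) := by
    rw [hpred]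
    have := oddpos_emod_eq_pzSel (pzZerosFrom 0 arr) 0 (by omega)
    simpa using this
  have hcongr :
      (PySem.List.enumerate arr).filter (fun p =>
        !(PySem.Set.contains (PySem.Set.ofList
          (((PySem.List.enumerate (pzZerosFrom 0 arr) 0).filter
            (fun p => PySem.Int.mod p.1 2 == 1)).map (fun p => p.2))) p.1))
      = (PySem.List.enumerate arr).filter (fun p =>
        !decide (p.1 ∈ pzSel false (pzZerosFrom 0 arr))) := by
    apply List.filter_congr
    intro p _
    rw [hodd]
    simp [PySem.Set.contains_eq_listContains]
  simp only [hz]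
  rw [hcongr]
  exact pzFilter_eq_pzSpec arr 0 false

-- ===== VERDICT (by name: the statement is the Claim_ definition above) =====
theorem pair_zeros_spec : Claim_equal_pair_zeros := by
  intro arr _
  unfold Spec_pair_zeros
  rw [pair_zeros_eq_spec, pair_zeros_alt_eq_spec]
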